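-- pv_equiv track=rewrite | github.com/MithunrajM777/chatbot | mongo_chatbot_ai.py | ai_failed
-- ===== SOURCE A (Python) =====
-- def ai_failed(reply: str):
--     failure_phrases = [
--         "i don't know",
--         "i am not sure",
--         "no information",
--         "cannot help",
--         "not available",
--         "sorry"
--     ]
--     reply = reply.lower()
--     return any(phrase in reply for phrase in failure_phrases)
-- ===== SOURCE B (Python) =====
-- def ai_failed(reply: str):
--     failure_phrases = [
--         "i don't know",
--         "i am not sure",
--         "no information",
--         "cannot help",
--         "not available",
--         "sorry"
--     ]
--     r = reply.lower()
--     # single left-to-right scan over positions: at each position test whether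
--     # any phrase starts there
--     return any(r.startswith(p, i) for i in range(len(r) + 1) for p in failure_phrases)
-- ===== Notes on version B (the rewrite author's own statement) =====
-- stated objective: alternative
-- what changed: Replaces six independent full substring searches ('phrase in reply') with one left-to-right scan over positions of the lowercased reply, testing at each position whether any phrase starts there (str.startswith with a start offset).
import Mathlib
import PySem

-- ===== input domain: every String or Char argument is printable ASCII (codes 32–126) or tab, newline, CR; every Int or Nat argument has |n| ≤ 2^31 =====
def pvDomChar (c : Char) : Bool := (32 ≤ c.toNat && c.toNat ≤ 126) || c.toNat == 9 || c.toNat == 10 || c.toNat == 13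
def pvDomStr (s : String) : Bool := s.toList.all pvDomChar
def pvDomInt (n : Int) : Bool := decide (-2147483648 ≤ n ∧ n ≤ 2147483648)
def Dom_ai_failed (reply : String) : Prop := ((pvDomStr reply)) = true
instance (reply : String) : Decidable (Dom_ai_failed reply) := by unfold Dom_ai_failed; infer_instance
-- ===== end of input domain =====

-- B replaces six independent substring searches with one left-to-right scan over
-- positions of the lowercased reply, testing at each position whether any phrase
-- starts there (objective: alternative).

-- ===== PORT A =====
def pvPhrases : List String :=
  ["i don't know", "i am not sure", "no information", "cannot help", "not available", "sorry"]

def ai_failed (reply : String) : Bool :=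
  let r := PySem.Str.lower reply
  pvPhrases.any (fun phrase => PySem.Str.isIn phrase r)

-- ===== PORT B =====
def pvPhrasesB : List (List Char) :=
  ["i don't know".toList, "i am not sure".toList, "no information".toList,
   "cannot help".toList, "not available".toList, "sorry".toList]

-- r.startswith(p, i) with 0 ≤ i ≤ len(r) is 'p is a prefix of r dropped at i'
def ai_failed_alt (reply : String) : Bool :=
  let r := (PySem.Str.lower reply).toList
  (List.range (r.length + 1)).any
    (fun i => pvPhrasesB.any (fun p => PySem.Chars.startswith (r.drop i) p))

-- ===== PRECONDITION & SPEC =====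
def Spec_ai_failed (reply : String) (out : Bool) : Prop := out = ai_failed_alt reply
instance (reply : String) (out : Bool) : Decidable (Spec_ai_failed reply out) := by unfold Spec_ai_failed; infer_instance

-- ===== CLAIM (what is proved, stated in full; the proofs are below) =====
def Claim_equal_ai_failed : Prop := ∀ (reply : String), Dom_ai_failed reply → Spec_ai_failed reply (ai_failed reply)

-- ===== LEMMAS AND PROOFS =====

-- 'sub in r' iff sub starts at some position i ≤ len r
theorem pv_isIn_iff_bounded_prefix (sub r : List Char) :
    PySem.Chars.isIn sub r = true ↔ ∃ i < r.length + 1, sub <+: r.drop i := by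
  rw [← PySem.Chars.exists_prefix_drop_iff_isIn]
  constructor
  · rintro ⟨j, hj⟩
    by_cases h : j ≤ r.length
    · exact ⟨j, by omega, hj⟩
    · refine ⟨r.length, by omega, ?_⟩
      rw [List.drop_length]
      rwa [List.drop_eq_nil_of_le (by omega)] at hj
  · rintro ⟨i, _, hi⟩; exact ⟨i, hi⟩

theorem pv_any_scan (ps : List (List Char)) (r : List Char) :
    ps.any (fun p => PySem.Chars.isIn p r) =
      (List.range (r.length + 1)).any
        (fun i => ps.any (fun p => PySem.Chars.startswith (r.drop i) p)) := by
  rw [Bool.eq_iff_iff]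
  simp only [List.any_eq_true, List.mem_range, pv_isIn_iff_bounded_prefix,
    PySem.Chars.startswith_iff]
  constructor
  · rintro ⟨p, hp, i, hi, hpre⟩; exact ⟨i, hi, p, hp, hpre⟩
  · rintro ⟨i, hi, p, hp, hpre⟩; exact ⟨p, hp, i, hi, hpre⟩

theorem pvPhrasesB_eq : pvPhrasesB = pvPhrases.map String.toList := by rfl

theorem pv_ports_agree (reply : String) : ai_failed reply = ai_failed_alt reply := by
  unfold ai_failed ai_failed_alt
  simp only [PySem.Str.isIn_eq, PySem.Str.toList_lower, pvPhrasesB_eq]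
  have h := pv_any_scan (pvPhrases.map String.toList) (PySem.Chars.lower reply.toList)
  simpa only [List.any_map, Function.comp] using h

-- ===== VERDICT (by name: the statement is the Claim_ definition above) =====
theorem ai_failed_spec : Claim_equal_ai_failed := by
  intro reply _
  exact pv_ports_agree reply
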